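-- pv_equiv track=rewrite | github.com/robinrob/life | diagonal_arrangement.py | arrange_relative
-- ===== SOURCE A (Python) =====
-- def arrange_relative(size, flip=False):
--     cells = []
--
--     for i in range(size):
--         pos = int(i / 2)
--         if (i % 2):
--             pos *= -1
--
--         x = pos
--         y = pos if not flip else -1 * pos
--
--         cells.append((x, y))
--
--     return cells
-- ===== SOURCE B (Python) =====
-- def arrange_relative(size, flip=False):
--     # Emit cells in symmetric pairs (k,k),(-k,-k), capped at `size` cells.
--     s = -1 if flip else 1
--     cells = []
--     k = 0
--     while len(cells) < size:
--         cells.append((k, s * k))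
--         if len(cells) < size:
--             cells.append((-k, -s * k))
--         k += 1
--     return cells
-- ===== Notes on version B (the rewrite author's own statement) =====
-- stated objective: alternative
-- what changed: B replaces A's single index loop computing int(i/2) with parity-based sign flips by a pair-emitting loop that appends (k,k) then (-k,-k) per step, capped at size cells, with no division or parity test.
import Mathlib
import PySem

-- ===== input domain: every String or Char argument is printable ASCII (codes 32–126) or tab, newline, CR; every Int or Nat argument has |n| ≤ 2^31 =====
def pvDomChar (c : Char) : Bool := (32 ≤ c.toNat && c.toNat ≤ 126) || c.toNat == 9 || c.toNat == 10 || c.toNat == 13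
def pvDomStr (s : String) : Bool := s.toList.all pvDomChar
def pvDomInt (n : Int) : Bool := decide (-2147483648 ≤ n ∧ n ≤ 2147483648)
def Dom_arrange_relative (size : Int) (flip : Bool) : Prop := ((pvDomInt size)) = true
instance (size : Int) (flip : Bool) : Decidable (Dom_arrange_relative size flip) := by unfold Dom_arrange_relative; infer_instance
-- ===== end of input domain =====

-- B emits the cells in symmetric pairs (k,k),(-k,-k) capped at `size`, instead of A's
-- index loop with division/parity; same return value (objective: alternative decomposition).

-- ===== PORT A =====
-- int(i/2) is exact truncating division here (0 ≤ i < 2^31 < 2^53): PySem.Int.truncdiv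
def arrange_relative (size : Int) (flip : Bool) : List (Int × Int) :=
  (PySem.List.pyRange 0 size 1).foldl (fun cells i =>
    let pos0 := PySem.Int.truncdiv i 2
    let pos := if PySem.Int.mod i 2 ≠ 0 then pos0 * (-1) else pos0
    let x := pos
    let y := if !flip then pos else -1 * pos
    cells ++ [(x, y)]) []

-- ===== PORT B =====
-- the while-loop of Source B: `n` is the number of cells still to emit (size - len(cells))
def pvAltLoop (s : Int) (k : Int) (n : Nat) : List (Int × Int) :=
  match n with
  | 0 => []
  | 1 => [(k, s * k)]
  | n + 2 => (k, s * k) :: (-k, -(s * k)) :: pvAltLoop s (k + 1) n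

def arrange_relative_alt (size : Int) (flip : Bool) : List (Int × Int) :=
  pvAltLoop (if flip then -1 else 1) 0 size.toNat

-- ===== PRECONDITION & SPEC =====
def Spec_arrange_relative (size : Int) (flip : Bool) (out : List (Int × Int)) : Prop := out = arrange_relative_alt size flip
instance (size : Int) (flip : Bool) (out : List (Int × Int)) : Decidable (Spec_arrange_relative size flip out) := by unfold Spec_arrange_relative; infer_instance

-- ===== CLAIM (what is proved, stated in full; the proofs are below) =====
def Claim_equal_arrange_relative : Prop := ∀ (size : Int) (flip : Bool), Dom_arrange_relative size flip → Spec_arrange_relative size flip (arrange_relative size flip)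

-- ===== LEMMAS AND PROOFS =====

-- A's loop body as a function of the index
def pvElem (flip : Bool) (i : Int) : Int × Int :=
  let pos0 := PySem.Int.truncdiv i 2
  let pos := if PySem.Int.mod i 2 ≠ 0 then pos0 * (-1) else pos0
  (pos, if !flip then pos else -1 * pos)

theorem pvElem_even (flip : Bool) (k : Nat) :
    pvElem flip ((2 * k : Nat) : Int) = ((k : Int), (if flip then -1 else 1) * (k : Int)) := by
  simp [pvElem, PySem.Int.truncdiv, PySem.Int.mod]
  cases flip <;> simp

theorem pvElem_odd (flip : Bool) (k : Nat) :
    pvElem flip ((2 * k + 1 : Nat) : Int) = (-(k : Int), -((if flip then -1 else 1) * (k : Int))) := by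
  simp [pvElem, PySem.Int.truncdiv, PySem.Int.mod, Int.tdiv_eq_ediv]
  cases flip <;> simp [Int.mul_comm] <;> omega

theorem pvAltLoop_eq (s : Int) (flip : Bool) (hs : s = if flip then -1 else 1) :
    ∀ (n k : Nat), pvAltLoop s ((k : Int)) n = (List.range n).map (fun (j : Nat) => pvElem flip ((j + 2 * k : Nat) : Int)) := by
  intro n
  induction n using Nat.strong_induction_on with
  | _ n ih =>
    intro k
    match n with
    | 0 => simp [pvAltLoop]
    | 1 =>
      have h := pvElem_even flip k
      simp [pvAltLoop, List.range_one, ← hs] at h ⊢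
      exact h.symm
    | n + 2 =>
      have he := pvElem_even flip k
      have ho := pvElem_odd flip k
      rw [pvAltLoop, List.range_succ_eq_map, List.range_succ_eq_map]
      simp only [List.map_cons, List.map_map]
      rw [show ((k : Int) + 1) = ((k + 1 : Nat) : Int) by push_cast; ring]
      rw [ih n (by omega) (k + 1)]
      rw [← hs] at he ho
      simp only [List.cons.injEq]
      refine ⟨?_, ?_, ?_⟩
      · simpa using he.symm
      · rw [show (Nat.succ 0 + 2 * k) = 2 * k + 1 by omega]
        exact ho.symm
      · apply List.map_congr_left
        intro j hj
        simp only [Function.comp_apply]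
        congr 2
        omega

theorem arrange_relative_eq_map (size : Int) (flip : Bool) :
    arrange_relative size flip = (List.range size.toNat).map (fun (j : Nat) => pvElem flip (j : Int)) := by
  unfold arrange_relative
  rw [PySem.List.foldl_append_singleton_eq_map, PySem.List.pyRange_one]
  simp [List.map_map, pvElem]

-- ===== VERDICT (by name: the statement is the Claim_ definition above) =====
theorem arrange_relative_spec : Claim_equal_arrange_relative := by
  intro size flip _
  unfold Spec_arrange_relative arrange_relative_alt
  rw [arrange_relative_eq_map]
  have h := pvAltLoop_eq _ flip rfl size.toNat 0
  simp only [Nat.cast_zero, Nat.mul_zero, Nat.add_zero] at h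
  rw [h]
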